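-- pv_equiv track=rewrite | github.com/xflynx25/boring_uninteresting_repo | Brain_helpers.py | score_transfers_initialization
-- ===== SOURCE A (Python) =====
-- def score_transfers_initialization(op_key, point_deltas, transfer_list):
--     forb_spots = {1:set(),2:set(),3:set(),4:set()}
--     inb_pts = {1:[],2:[],3:[],4:[]}
--     for trans, pts in zip(reversed(transfer_list), reversed(point_deltas)):
--         out = trans[0]
--         pos, i = op_key[out]
--         forb_spots[pos].add(i)
--
--         inb_pts[pos].append(pts)
--
--     return forb_spots, inb_pts
-- ===== SOURCE B (Python) =====
-- def score_transfers_initialization(op_key, point_deltas, transfer_list):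
--     pairs = list(zip(reversed(transfer_list), reversed(point_deltas)))
--     forb_spots = {p: {op_key[t[0]][1] for t, _ in pairs if op_key[t[0]][0] == p}
--                   for p in (1, 2, 3, 4)}
--     inb_pts = {p: [pts for t, pts in pairs if op_key[t[0]][0] == p]
--                for p in (1, 2, 3, 4)}
--     return forb_spots, inb_pts
-- ===== Notes on version B (the rewrite author's own statement) =====
-- stated objective: alternative
-- what changed: Replaces the single distributing pass that mutates two pre-keyed dicts with four independent filtering comprehensions, one per position; Pre_ excludes exactly the inputs where A raises (empty transfer entry, player id missing from op_key, or a looked-up position outside 1..4).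
import Mathlib
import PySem

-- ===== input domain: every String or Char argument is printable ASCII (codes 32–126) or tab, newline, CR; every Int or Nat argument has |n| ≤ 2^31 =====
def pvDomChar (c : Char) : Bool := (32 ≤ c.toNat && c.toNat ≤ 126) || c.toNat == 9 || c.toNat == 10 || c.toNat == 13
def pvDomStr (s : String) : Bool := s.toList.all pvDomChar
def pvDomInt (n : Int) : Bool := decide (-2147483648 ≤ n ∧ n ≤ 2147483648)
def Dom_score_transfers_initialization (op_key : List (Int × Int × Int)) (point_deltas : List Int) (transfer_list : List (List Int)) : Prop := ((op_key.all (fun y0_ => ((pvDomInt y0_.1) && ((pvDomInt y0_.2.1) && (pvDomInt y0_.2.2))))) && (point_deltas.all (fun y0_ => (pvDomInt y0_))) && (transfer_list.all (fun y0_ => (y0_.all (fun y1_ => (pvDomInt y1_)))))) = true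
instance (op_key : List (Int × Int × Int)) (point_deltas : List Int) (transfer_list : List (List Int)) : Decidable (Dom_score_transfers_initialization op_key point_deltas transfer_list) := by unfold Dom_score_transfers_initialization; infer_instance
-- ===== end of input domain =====

-- B replaces A's single distributing pass over two mutable dicts by four per-position
-- filtering comprehensions; equivalence is proved on the inputs where A returns.

-- op_key is a Python dict: lookup with exact dict semantics (duplicate keys overwrite)
def pvLook (op_key : List (Int × Int × Int)) (k : Int) : Option (Int × Int) :=
  (PySem.Dict.ofList op_key).get? k

-- ===== PORT A =====
-- forb_spots[pos].add(i) on a dict with fixed keys: in-place update of the matching entry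
def pvBumpSet (d : List (Int × List Int)) (p i : Int) : List (Int × List Int) :=
  d.map (fun e => if e.1 == p then (e.1, PySem.Set.add e.2 i) else e)

-- inb_pts[pos].append(pts)
def pvBumpList (d : List (Int × List Int)) (p x : Int) : List (Int × List Int) :=
  d.map (fun e => if e.1 == p then (e.1, e.2 ++ [x]) else e)

-- one iteration of A's loop
def pvStep (op_key : List (Int × Int × Int)) (st : (List (Int × List Int)) × (List (Int × List Int))) (pr : List Int × Int) : (List (Int × List Int)) × (List (Int × List Int)) :=
  let out := PySem.List.pyGetD pr.1 0 0              -- trans[0]; Pre_ gives trans ≠ []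
  match pvLook op_key out with                       -- op_key[out]; Pre_ gives the key present
  | some (pos, i) => (pvBumpSet st.1 pos i, pvBumpList st.2 pos pr.2)
  | none => st                                       -- KeyError: excluded by Pre_

def score_transfers_initialization (op_key : List (Int × Int × Int)) (point_deltas : List Int) (transfer_list : List (List Int)) : (List (Int × List Int)) × (List (Int × List Int)) :=
  (transfer_list.reverse.zip point_deltas.reverse).foldl (pvStep op_key)
    ([(1, []), (2, []), (3, []), (4, [])], [(1, []), (2, []), (3, []), (4, [])])

-- ===== PORT B =====
def pvPosOf (op_key : List (Int × Int × Int)) (t : List Int) : Int :=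
  ((pvLook op_key (PySem.List.pyGetD t 0 0)).getD (0, 0)).1    -- op_key[t[0]][0]; Pre_ gives the key present

def pvIdxOf (op_key : List (Int × Int × Int)) (t : List Int) : Int :=
  ((pvLook op_key (PySem.List.pyGetD t 0 0)).getD (0, 0)).2    -- op_key[t[0]][1]

def score_transfers_initialization_alt (op_key : List (Int × Int × Int)) (point_deltas : List Int) (transfer_list : List (List Int)) : (List (Int × List Int)) × (List (Int × List Int)) :=
  let pairs := transfer_list.reverse.zip point_deltas.reverse
  (([1, 2, 3, 4] : List Int).map (fun p =>
      (p, PySem.Set.ofList ((pairs.filter (fun pr => pvPosOf op_key pr.1 == p)).map (fun pr => pvIdxOf op_key pr.1)))),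
   ([1, 2, 3, 4] : List Int).map (fun p =>
      (p, (pairs.filter (fun pr => pvPosOf op_key pr.1 == p)).map (·.2))))

-- ===== PRECONDITION & SPEC =====
-- Pre_ excludes exactly the inputs where A raises: a zipped transfer that is empty
-- (IndexError), whose player id is not a key of op_key (KeyError), or whose looked-up
-- position is outside {1,2,3,4} (KeyError on forb_spots[pos]).
def Pre_score_transfers_initialization (op_key : List (Int × Int × Int)) (point_deltas : List Int) (transfer_list : List (List Int)) : Prop :=
  ∀ pr ∈ transfer_list.reverse.zip point_deltas.reverse,
    pr.1 ≠ [] ∧ ((pvLook op_key pr.1.headI).map (·.1)).getD 0 ∈ ([1, 2, 3, 4] : List Int)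
instance (op_key : List (Int × Int × Int)) (point_deltas : List Int) (transfer_list : List (List Int)) : Decidable (Pre_score_transfers_initialization op_key point_deltas transfer_list) := by unfold Pre_score_transfers_initialization; infer_instance

def pvWitness_score_transfers_initialization : (List (Int × Int × Int)) × List Int × List (List Int) :=
  ([(5, 1, 2), (6, 3, 0)], [7, -1], [[5], [6, 9]])

def Spec_score_transfers_initialization (op_key : List (Int × Int × Int)) (point_deltas : List Int) (transfer_list : List (List Int)) (out : (List (Int × List Int)) × (List (Int × List Int))) : Prop := out = score_transfers_initialization_alt op_key point_deltas transfer_list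
instance (op_key : List (Int × Int × Int)) (point_deltas : List Int) (transfer_list : List (List Int)) (out : (List (Int × List Int)) × (List (Int × List Int))) : Decidable (Spec_score_transfers_initialization op_key point_deltas transfer_list out) := by unfold Spec_score_transfers_initialization; infer_instance

-- ===== CLAIM (what is proved, stated in full; the proofs are below) =====
def Claim_equal_score_transfers_initialization : Prop := ∀ (op_key : List (Int × Int × Int)) (point_deltas : List Int) (transfer_list : List (List Int)), Dom_score_transfers_initialization op_key point_deltas transfer_list → Pre_score_transfers_initialization op_key point_deltas transfer_list → Spec_score_transfers_initialization op_key point_deltas transfer_list (score_transfers_initialization op_key point_deltas transfer_list)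

-- ===== LEMMAS AND PROOFS =====

-- selected indices / point deltas for position p
def pvSelI (op_key : List (Int × Int × Int)) (p : Int) (L : List (List Int × Int)) : List Int :=
  (L.filter (fun pr => pvPosOf op_key pr.1 == p)).map (fun pr => pvIdxOf op_key pr.1)
def pvSelP (op_key : List (Int × Int × Int)) (p : Int) (L : List (List Int × Int)) : List Int :=
  (L.filter (fun pr => pvPosOf op_key pr.1 == p)).map (·.2)

theorem pv_step_eq (op_key : List (Int × Int × Int)) (st : (List (Int × List Int)) × (List (Int × List Int))) (pr : List Int × Int) (q i : Int)
    (hl : pvLook op_key (PySem.List.pyGetD pr.1 0 0) = some (q, i)) :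
    pvStep op_key st pr = (pvBumpSet st.1 q i, pvBumpList st.2 q pr.2) := by
  simp [pvStep, hl]

theorem pv_main (op_key : List (Int × Int × Int)) (L : List (List Int × Int))
    (h : ∀ pr ∈ L, pr.1 ≠ [] ∧ ((pvLook op_key pr.1.headI).map (·.1)).getD 0 ∈ ([1, 2, 3, 4] : List Int))
    (s1 s2 s3 s4 l1 l2 l3 l4 : List Int) :
    L.foldl (pvStep op_key)
      ([(1, s1), (2, s2), (3, s3), (4, s4)], [(1, l1), (2, l2), (3, l3), (4, l4)])
    = ([(1, (pvSelI op_key 1 L).foldl PySem.Set.add s1),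
        (2, (pvSelI op_key 2 L).foldl PySem.Set.add s2),
        (3, (pvSelI op_key 3 L).foldl PySem.Set.add s3),
        (4, (pvSelI op_key 4 L).foldl PySem.Set.add s4)],
       [(1, l1 ++ pvSelP op_key 1 L), (2, l2 ++ pvSelP op_key 2 L),
        (3, l3 ++ pvSelP op_key 3 L), (4, l4 ++ pvSelP op_key 4 L)]) := by
  induction L generalizing s1 s2 s3 s4 l1 l2 l3 l4 with
  | nil => simp [pvSelI, pvSelP]
  | cons pr L ih =>
    obtain ⟨hne, hmem⟩ := h pr (List.mem_cons_self ..)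
    have hhd : PySem.List.pyGetD pr.1 0 0 = pr.1.headI := by
      cases hp : pr.1 with
      | nil => exact absurd hp hne
      | cons a t => simp [PySem.List.pyGetD_zero_cons, List.headI]
    have h' : ∀ q ∈ L, q.1 ≠ [] ∧ ((pvLook op_key q.1.headI).map (·.1)).getD 0 ∈ ([1, 2, 3, 4] : List Int) :=
      fun q hq => h q (List.mem_cons_of_mem _ hq)
    cases hl : pvLook op_key pr.1.headI with
    | none => simp [hl] at hmem
    | some v =>
      obtain ⟨pos, i⟩ := v
      simp only [hl, Option.map_some, Option.getD_some, List.mem_cons, List.not_mem_nil,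
        or_false] at hmem
      rcases hmem with hp | hp | hp | hp <;> subst hp <;>
        (rw [List.foldl_cons, pv_step_eq op_key _ pr _ i (by rw [hhd]; exact hl)]
         simp only [pvBumpSet, pvBumpList, List.map_cons, List.map_nil]
         norm_num
         rw [ih h']
         simp [pvSelI, pvSelP, pvPosOf, pvIdxOf, hhd, hl])

-- ===== VERDICT (by name: the statement is the Claim_ definition above) =====
theorem score_transfers_initialization_spec : Claim_equal_score_transfers_initialization := by
  intro op_key point_deltas transfer_list _ hpre
  unfold Spec_score_transfers_initialization
  unfold score_transfers_initialization score_transfers_initialization_alt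
  rw [pv_main op_key _ hpre]
  simp [pvSelI, pvSelP, PySem.Set.ofList_eq_foldl]
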